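-- pv_equiv track=rewrite | github.com/andrewconnors/leetcode-practice | intersection-of-two-arrays.py | get_intersection_fast
-- ===== SOURCE A (Python) =====
-- def get_intersection_fast(nums1, nums2):
--     arr_dict = {}
--     #O(N)
--     for item in nums1:
--         if item not in arr_dict:
--             arr_dict[item] = 1
--     #O(N)
--     for item in nums2:
--         if item in arr_dict:
--             arr_dict[item] = 2
--     #O(N)
--     return [x for x in arr_dict.keys() if arr_dict[x] == 2]
-- ===== SOURCE B (Python) =====
-- def get_intersection_fast(nums1, nums2):
--     return [x for i, x in enumerate(nums1) if x in nums2 and x not in nums1[:i]]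
-- ===== Notes on version B (the rewrite author's own statement) =====
-- stated objective: simpler
-- what changed: Replaces A's hash-table marking (two dict passes plus a keys comprehension) with a structure-free brute-force comprehension: keep nums1[i] iff it occurs in nums2 (linear scan) and not in the prefix nums1[:i] (prefix-scan dedup).
import Mathlib
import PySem

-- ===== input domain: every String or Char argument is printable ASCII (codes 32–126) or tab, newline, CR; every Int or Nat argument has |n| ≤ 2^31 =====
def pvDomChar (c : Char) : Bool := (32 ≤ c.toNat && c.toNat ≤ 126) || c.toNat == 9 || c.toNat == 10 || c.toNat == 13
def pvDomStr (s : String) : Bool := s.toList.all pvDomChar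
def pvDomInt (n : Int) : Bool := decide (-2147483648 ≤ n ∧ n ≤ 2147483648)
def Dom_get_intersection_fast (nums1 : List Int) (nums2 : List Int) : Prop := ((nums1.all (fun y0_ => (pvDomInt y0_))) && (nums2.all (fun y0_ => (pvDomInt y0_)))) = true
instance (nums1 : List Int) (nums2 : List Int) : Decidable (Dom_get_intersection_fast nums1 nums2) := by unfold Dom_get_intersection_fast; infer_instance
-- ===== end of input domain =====

-- B replaces A's hash-table marking (two dict passes plus a keys comprehension) with a
-- structure-free brute-force comprehension: keep nums1[i] iff it occurs in nums2 and not
-- in the prefix nums1[:i] (simpler, not faster).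

-- ===== PORT A =====
def get_intersection_fast (nums1 : List Int) (nums2 : List Int) : List Int :=
  let d0 : PySem.Dict Int Int :=
    nums1.foldl (fun d item => if !(d.contains item) then d.insert item 1 else d) PySem.Dict.empty
  let d : PySem.Dict Int Int :=
    nums2.foldl (fun d item => if d.contains item then d.insert item 2 else d) d0
  d.keys.filter (fun x => d.getD x 0 == 2)

-- ===== PORT B =====
def get_intersection_fast_alt (nums1 : List Int) (nums2 : List Int) : List Int :=
  ((PySem.List.enumerate nums1).filter
    (fun p => decide (p.2 ∈ nums2) && !decide (p.2 ∈ PySem.List.slice nums1 none (some p.1)))).map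
    Prod.snd

-- ===== PRECONDITION & SPEC =====
def Spec_get_intersection_fast (nums1 : List Int) (nums2 : List Int) (out : List Int) : Prop := out = get_intersection_fast_alt nums1 nums2
instance (nums1 : List Int) (nums2 : List Int) (out : List Int) : Decidable (Spec_get_intersection_fast nums1 nums2 out) := by unfold Spec_get_intersection_fast; infer_instance

-- ===== CLAIM (what is proved, stated in full; the proofs are below) =====
def Claim_equal_get_intersection_fast : Prop := ∀ (nums1 : List Int) (nums2 : List Int), Dom_get_intersection_fast nums1 nums2 → Spec_get_intersection_fast nums1 nums2 (get_intersection_fast nums1 nums2)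

-- ===== LEMMAS AND PROOFS =====

-- `newD s l`: the elements of l not in s, first occurrences, in order.
def newD (s : List Int) : List Int → List Int
  | [] => []
  | a :: l => if a ∈ s then newD s l else a :: newD (s ++ [a]) l

-- `bfilter n2 pre l`: what B's comprehension produces from remaining input l with prefix pre.
def bfilter (n2 : List Int) (pre : List Int) : List Int → List Int
  | [] => []
  | a :: l => if a ∈ n2 ∧ a ∉ pre then a :: bfilter n2 (pre ++ [a]) l
              else bfilter n2 (pre ++ [a]) l

theorem foldl_add_eq_append_newD (l s : List Int) :
    l.foldl PySem.Set.add s = s ++ newD s l := by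
  induction l generalizing s with
  | nil => simp [newD]
  | cons a l ih =>
    by_cases h : a ∈ s
    · have hadd : PySem.Set.add s a = s := by
        simp [PySem.Set.add, PySem.Set.contains, h]
      rw [List.foldl_cons, hadd, ih, newD]
      simp [h]
    · have hadd : PySem.Set.add s a = s ++ [a] := by
        simp [PySem.Set.add, PySem.Set.contains, h]
      rw [List.foldl_cons, hadd, ih, newD]
      simp [h]

theorem newD_nil_eq_ofList (l : List Int) : newD [] l = PySem.Set.ofList l := by
  rw [PySem.Set.ofList_eq_foldl, foldl_add_eq_append_newD, List.nil_append]

theorem keys_mk_map {f : Int → Int × Int} (h : ∀ k, (f k).1 = k) (s : List Int) :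
    (PySem.Dict.mk (s.map f)).keys = s := by
  simp only [PySem.Dict.keys_mk, List.map_map]
  simp [Function.comp_def, h]

-- A's first loop: a dict over keys s, all values 1, grows to keys s ++ newD s l, all values 1.
theorem loop1 (l : List Int) (s : List Int) :
    l.foldl (fun d item => if !(d.contains item) then d.insert item (1:Int) else d)
      (PySem.Dict.mk (s.map (fun k => (k, (1:Int)))))
    = PySem.Dict.mk ((s ++ newD s l).map (fun k => (k, (1:Int)))) := by
  induction l generalizing s with
  | nil => simp [newD]
  | cons a l ih =>
    have hkeys : (PySem.Dict.mk (s.map (fun k => (k, (1:Int))))).keys = s :=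
      keys_mk_map (fun _ => rfl) s
    by_cases h : a ∈ s
    · have hc : (PySem.Dict.mk (s.map (fun k => (k, (1:Int))))).contains a = true := by
        rw [PySem.Dict.contains_iff_mem_keys, hkeys]; exact h
      rw [List.foldl_cons, if_neg (by simp [hc]), ih]
      simp [newD, h]
    · have hc : (PySem.Dict.mk (s.map (fun k => (k, (1:Int))))).contains a = false := by
        rw [Bool.eq_false_iff]
        intro hcon
        exact h (by rwa [PySem.Dict.contains_iff_mem_keys, hkeys] at hcon)
      have hins : (PySem.Dict.mk (s.map (fun k => (k, (1:Int))))).insert a 1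
          = PySem.Dict.mk ((s ++ [a]).map (fun k => (k, (1:Int)))) := by
        apply PySem.Dict.ext
        simp [PySem.Dict.items_insert, hc]
      rw [List.foldl_cons, if_pos (by simp [hc]), hins, ih]
      simp [newD, h]

-- A's second loop: marks with 2 exactly the keys occurring in l; keys and order unchanged.
theorem loop2 (l : List Int) (keys : List Int) (f : Int → Int) :
    l.foldl (fun d item => if d.contains item then d.insert item (2:Int) else d)
      (PySem.Dict.mk (keys.map (fun k => (k, f k))))
    = PySem.Dict.mk (keys.map (fun k => (k, if k ∈ l then (2:Int) else f k))) := by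
  induction l generalizing f with
  | nil => simp
  | cons a l ih =>
    have hkeys : (PySem.Dict.mk (keys.map (fun k => (k, f k)))).keys = keys :=
      keys_mk_map (fun _ => rfl) keys
    by_cases h : a ∈ keys
    · have hc : (PySem.Dict.mk (keys.map (fun k => (k, f k)))).contains a = true := by
        rw [PySem.Dict.contains_iff_mem_keys, hkeys]; exact h
      have hins : (PySem.Dict.mk (keys.map (fun k => (k, f k)))).insert a 2
          = PySem.Dict.mk (keys.map (fun k => (k, if k = a then (2:Int) else f k))) := by
        apply PySem.Dict.ext
        simp only [PySem.Dict.items_insert, hc, List.map_map]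
        apply List.map_congr_left
        intro k _
        by_cases hk : k = a <;> simp [hk]
      rw [List.foldl_cons, if_pos hc, hins, ih]
      congr 1
      apply List.map_congr_left
      intro k _
      by_cases hkl : k ∈ l <;> by_cases hka : k = a <;>
        simp [hkl, hka, List.mem_cons]
    · have hc : (PySem.Dict.mk (keys.map (fun k => (k, f k)))).contains a = false := by
        rw [Bool.eq_false_iff]
        intro hcon
        exact h (by rwa [PySem.Dict.contains_iff_mem_keys, hkeys] at hcon)
      rw [List.foldl_cons, if_neg (by simp [hc]), ih]
      congr 1
      apply List.map_congr_left
      intro k hk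
      have hka : k ≠ a := fun e => h (e ▸ hk)
      simp [List.mem_cons, hka]

theorem nodup_newD_nil (l : List Int) : (newD [] l).Nodup := by
  rw [newD_nil_eq_ofList]; exact PySem.Set.nodup_ofList l

-- A's result equals the filtered ordered dedup of nums1.
theorem A_eq_filter (nums1 nums2 : List Int) :
    get_intersection_fast nums1 nums2
      = (newD [] nums1).filter (fun x => decide (x ∈ nums2)) := by
  unfold get_intersection_fast
  simp only []
  rw [show (PySem.Dict.empty : PySem.Dict Int Int)
        = PySem.Dict.mk (([] : List Int).map (fun k => (k, (1:Int)))) from rfl,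
    loop1, List.nil_append, loop2]
  set D := newD [] nums1 with hD
  have hkeys : (PySem.Dict.mk (D.map (fun k => (k, if k ∈ nums2 then (2:Int) else 1)))).keys = D :=
    keys_mk_map (fun _ => rfl) D
  rw [hkeys]
  apply List.filter_congr
  intro x hx
  have hval : (PySem.Dict.mk (D.map (fun k => (k, if k ∈ nums2 then (2:Int) else 1)))).getD x 0
      = (if x ∈ nums2 then (2:Int) else 1) := by
    apply PySem.Dict.getD_of_mem_items
    · exact List.mem_map_of_mem hx
    · rw [hkeys]; exact nodup_newD_nil nums1
  rw [hval]
  by_cases hm : x ∈ nums2 <;> simp [hm]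

-- newD depends on the seen prefix only through membership.
theorem newD_congr (l : List Int) (s t : List Int) (h : ∀ x, x ∈ s ↔ x ∈ t) :
    newD s l = newD t l := by
  induction l generalizing s t with
  | nil => simp [newD]
  | cons a l ih =>
    by_cases ha : a ∈ s
    · rw [newD, if_pos ha, newD, if_pos ((h a).1 ha)]
      exact ih s t h
    · rw [newD, if_neg ha, newD, if_neg (fun e => ha ((h a).2 e))]
      congr 1
      apply ih
      intro x
      simp [h x]

-- bfilter is the filtered ordered dedup with respect to the same prefix.
theorem bfilter_eq_filter_newD (n2 : List Int) (l pre : List Int) :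
    bfilter n2 pre l = (newD pre l).filter (fun x => decide (x ∈ n2)) := by
  induction l generalizing pre with
  | nil => simp [bfilter, newD]
  | cons a l ih =>
    by_cases hp : a ∈ pre
    · rw [bfilter, if_neg (by tauto), newD, if_pos hp, ih,
        newD_congr l (pre ++ [a]) pre (fun x => by
          simp only [List.mem_append, List.mem_singleton]
          exact ⟨fun h => h.elim id (fun e => by rw [e]; exact hp), Or.inl⟩)]
    · by_cases h2 : a ∈ n2
      · rw [bfilter, if_pos ⟨h2, hp⟩, newD, if_neg hp, List.filter_cons,
          if_pos (by simpa using h2), ih]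
      · rw [bfilter, if_neg (by tauto), newD, if_neg hp, List.filter_cons,
          if_neg (by simpa using h2), ih]

-- B's comprehension over the enumeration, consumed from an arbitrary split point.
theorem B_loop (n2 : List Int) (nums1 : List Int) (pre l : List Int)
    (hsplit : nums1 = pre ++ l) :
    ((PySem.List.enumerate l (pre.length : Int)).filter
        (fun p => decide (p.2 ∈ n2) && !decide (p.2 ∈ PySem.List.slice nums1 none (some p.1)))).map
      Prod.snd = bfilter n2 pre l := by
  induction l generalizing pre with
  | nil => simp [PySem.List.enumerate_nil, bfilter]
  | cons a l ih =>
    have hslice : PySem.List.slice nums1 none (some (pre.length : Int)) = pre := by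
      rw [PySem.List.slice_to_natCast, hsplit, List.take_left]
    have hnext : nums1 = (pre ++ [a]) ++ l := by simp [hsplit]
    have hlen : ((pre.length : Int) + 1) = (((pre ++ [a]).length : Int)) := by
      simp
    rw [PySem.List.enumerate_cons, List.filter_cons]
    by_cases hc : a ∈ n2 ∧ a ∉ pre
    · rw [if_pos (by simp [hslice, hc.1, hc.2]), List.map_cons, hlen, ih (pre ++ [a]) hnext,
        bfilter, if_pos hc]
    · rw [if_neg (by
          simp only [hslice]
          rcases not_and_or.1 hc with h | h
          · simp [h]
          · simp [not_not.1 h]),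
        hlen, ih (pre ++ [a]) hnext, bfilter, if_neg hc]

theorem B_eq_bfilter (nums1 nums2 : List Int) :
    get_intersection_fast_alt nums1 nums2 = bfilter nums2 [] nums1 := by
  unfold get_intersection_fast_alt
  exact B_loop nums2 nums1 [] nums1 rfl

-- ===== VERDICT (by name: the statement is the Claim_ definition above) =====
theorem get_intersection_fast_spec : Claim_equal_get_intersection_fast := by
  intro nums1 nums2 _
  unfold Spec_get_intersection_fast
  rw [A_eq_filter, B_eq_bfilter, bfilter_eq_filter_newD]
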